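-- pv_equiv track=rewrite | github.com/bhavya25155-web/CO_RISCV_2025 | co_2026_evaluation_framework_release/SimpleAssembler/Assembler.py | immediate
-- ===== SOURCE A (Python) =====
-- def immediate(x, bits):
--     if bits<=0:
--         return "error"
--     x=x.strip()
--
--     # check sign
--     is_negative=False
--     if x[0]=="-":
--         is_negative=True
--         x=x[1:]   # remove '-'
--     if x=="" or not x.isdigit():
--         return "error"
--     y=int(x)
--
--     # decimal→binary
--     binary_int=0
--     place=1
--     if y==0:
--         binary_int=0
--     else:
--         while y!=0:
--             remainder=y%2
--             binary_int=remainder*place+binary_int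
--             place=place*10
--             y=y//2
--
--     # integer binary to string
--     binary=str(binary_int)
--
--     # check for overflow
--     if len(binary)>bits:
--         return "error"
--
--     # extend bits
--     while len(binary)<bits:
--         binary="0"+binary
--
--     # positive number
--     if not is_negative:
--         return binary
--
--     # negative number
--     #one's complement
--     flipped=""
--     i=0
--     while i<bits:
--         if binary[i]=="0":
--             flipped+="1"
--         else:
--             flipped+="0"
--         i+=1
--
--     # add 1
--     result=list(flipped)
--     carry=1
--     i=bits - 1
--     while i>=0 and carry==1:
--         if result[i]=="0":
--             result[i]="1"
--             carry=0
--         else: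
--             result[i]="0"
--         i -=1
--
--     #final string using for loop
--     final_string=""
--     for bit in result:
--         final_string=final_string+bit
--     return final_string
-- ===== SOURCE B (Python) =====
-- def immediate(x, bits):
--     if bits <= 0:
--         return "error"
--     x = x.strip()
--     # same preamble as the original: x[0] still raises IndexError on empty input
--     is_negative = x[0] == "-"
--     if is_negative:
--         x = x[1:]
--     if x == "" or not x.isdigit():
--         return "error"
--     m = int(x)
--     length = m.bit_length() if m else 1
--     if length > bits:
--         return "error"
--     value = -m if is_negative else m
--     return format(value & ((1 << bits) - 1), '0{}b'.format(bits))
-- ===== Notes on version B (the rewrite author's own statement) =====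
-- stated objective: simpler
-- what changed: B replaces A's manual decimal-digit binary construction, per-character one's-complement flip and ripple-carry add-1 loops by a closed form: overflow-check via m.bit_length(), then format(value & ((1<<bits)-1), '0{bits}b'), letting integer masking do two's complement and format do the zero-padded binary.
import Mathlib
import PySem

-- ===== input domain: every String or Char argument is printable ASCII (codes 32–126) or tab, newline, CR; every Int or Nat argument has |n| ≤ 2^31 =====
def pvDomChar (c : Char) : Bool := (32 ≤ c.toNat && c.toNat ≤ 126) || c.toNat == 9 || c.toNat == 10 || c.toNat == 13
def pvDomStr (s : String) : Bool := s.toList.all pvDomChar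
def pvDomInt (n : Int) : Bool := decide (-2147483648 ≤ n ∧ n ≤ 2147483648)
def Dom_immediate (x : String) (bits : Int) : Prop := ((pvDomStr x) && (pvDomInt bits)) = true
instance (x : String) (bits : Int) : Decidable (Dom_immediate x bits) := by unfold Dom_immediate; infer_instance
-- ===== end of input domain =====

-- B replaces A's manual binary/complement string machinery by the closed form (value & (1<<bits)-1) rendered
-- in binary and zero-filled (objective: simpler); A = B is proved on all inputs where Python A returns.


-- ===== PORT A =====
-- A's `while y!=0` decimal→binary loop; the fuel argument is only a totality guard: the Python loop runs
-- bit_length(y) ≤ fuel iterations for the nonnegative y reachable here.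
def immBinLoop : Nat → Int → Int → Int → Int
  | 0, _, _, acc => acc
  | f+1, y, place, acc =>
    if y ≠ 0 then
      immBinLoop f (PySem.Int.floordiv y 2) (place * 10) (PySem.Int.mod y 2 * place + acc)
    else acc

-- A's `while len(binary)<bits: binary="0"+binary`
def immPad (bits : Int) (cs : List Char) : List Char :=
  if h : (cs.length : Int) < bits then immPad bits ('0' :: cs) else cs
termination_by (bits - cs.length).toNat
decreasing_by simp only [List.length_cons]; omega

-- A's add-1 carry loop: `i=bits-1; while i>=0 and carry==1: ...` mutating result[i]
def immAdd (result : List Char) (carry : Int) (i : Int) : List Char :=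
  if h : 0 ≤ i ∧ carry = 1 then
    if PySem.List.pyGetD result i ' ' = '0' then
      immAdd (PySem.List.pySetD result i '1') 0 (i - 1)
    else
      immAdd (PySem.List.pySetD result i '0') 1 (i - 1)
  else result
termination_by (i + 1).toNat
decreasing_by all_goals omega

def immediate (x : String) (bits : Int) : String :=
  if bits ≤ 0 then "error" else
  let cs0 := PySem.Chars.strip x.toList
  -- x[0] == "-": Python raises IndexError when the stripped string is empty; Pre_ excludes exactly that
  let isNeg : Bool := decide (PySem.List.pyGetD cs0 0 ' ' = '-')
  let cs := if isNeg then PySem.List.slice cs0 (some 1) none else cs0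
  if cs = [] ∨ ¬ PySem.Chars.strIsdigit cs then "error" else
  let y : Int := (PySem.Int.ofChars? cs).getD 0   -- int(x): cannot raise after the isdigit check
  let binaryInt : Int := if y = 0 then 0 else immBinLoop (y.toNat + 1) y 1 0
  let binary := PySem.Int.toChars binaryInt
  if (binary.length : Int) > bits then "error" else
  let binary := immPad bits binary
  if !isNeg then String.ofList binary else
  let flipped := (PySem.List.pyRange 0 bits 1).foldl
      (fun acc i => acc ++ [if PySem.List.pyGetD binary i ' ' = '0' then '1' else '0']) []
  let result := immAdd flipped 1 (bits - 1)
  String.ofList (result.foldl (fun acc c => acc ++ [c]) [])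

-- ===== PORT B =====
def immediate_alt (x : String) (bits : Int) : String :=
  if bits ≤ 0 then "error" else
  let cs0 := PySem.Chars.strip x.toList
  -- identical preamble to A (B's Python keeps it, including the IndexError on empty input)
  let isNeg : Bool := decide (PySem.List.pyGetD cs0 0 ' ' = '-')
  let cs := if isNeg then PySem.List.slice cs0 (some 1) none else cs0
  if cs = [] ∨ ¬ PySem.Chars.strIsdigit cs then "error" else
  let m : Int := (PySem.Int.ofChars? cs).getD 0   -- int(x): cannot raise after the isdigit check
  let length : Int := if m ≠ 0 then (PySem.Int.bitLength m : Int) else 1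
  if length > bits then "error" else
  let value : Int := if isNeg then -m else m
  -- format(value & ((1<<bits)-1), '0{bits}b')
  String.ofList (PySem.Chars.zfill (PySem.Int.toBinChars (PySem.Int.band value ((1 <<< bits.toNat) - 1))) bits)

-- ===== PRECONDITION & SPEC =====
-- Pre_ excludes exactly the inputs where Python A raises (IndexError at x[0]): bits > 0 and x.strip() empty.
def Pre_immediate (x : String) (bits : Int) : Prop :=
  0 < bits → PySem.Chars.strip x.toList ≠ []
instance (x : String) (bits : Int) : Decidable (Pre_immediate x bits) := by
  unfold Pre_immediate; infer_instance

def pvWitness_immediate : String × Int := ("5", 4)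

def Spec_immediate (x : String) (bits : Int) (out : String) : Prop := out = immediate_alt x bits
instance (x : String) (bits : Int) (out : String) : Decidable (Spec_immediate x bits out) := by
  unfold Spec_immediate; infer_instance

-- ===== CLAIM (what is proved, stated in full; the proofs are below) =====
def Claim_equal_immediate : Prop :=
  ∀ (x : String) (bits : Int), Dom_immediate x bits → Pre_immediate x bits →
    Spec_immediate x bits (immediate x bits)

-- ===== LEMMAS AND PROOFS =====

-- the value A's decimal→binary loop accumulates: the base-2 digits of m read as a base-10 numeral
lemma immBinLoop_spec (m : Nat) : ∀ (f : Nat), m ≤ f → ∀ (place acc : Int),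
    immBinLoop f (m : Int) place acc = acc + place * ((Nat.ofDigits 10 (Nat.digits 2 m) : Nat) : Int) := by
  induction m using Nat.strong_induction_on with
  | _ m ih =>
    intro f hf place acc
    match f with
    | 0 =>
      have hm : m = 0 := by omega
      subst hm; simp [immBinLoop]
    | f+1 =>
      by_cases hm : m = 0
      · subst hm; simp [immBinLoop]
      · rw [immBinLoop, if_pos (by exact_mod_cast hm : ¬ ((m : Int) = 0))]
        rw [show PySem.Int.floordiv (m : Int) 2 = ((m / 2 : Nat) : Int) by
              exact_mod_cast PySem.Int.floordiv_natCast m 2,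
            show PySem.Int.mod (m : Int) 2 = ((m % 2 : Nat) : Int) by
              exact_mod_cast PySem.Int.mod_natCast m 2]
        rw [ih (m / 2) (Nat.div_lt_self (Nat.pos_of_ne_zero hm) one_lt_two) f (by
              have := Nat.div_lt_self (Nat.pos_of_ne_zero hm) one_lt_two; omega)]
        rw [Nat.digits_def' (by norm_num : (1:Nat) < 2) (Nat.pos_of_ne_zero hm), Nat.ofDigits_cons]
        push_cast
        ring

lemma toDigitsCore_eq (b : Nat) (hb : 2 ≤ b) : ∀ (n : Nat) (f : Nat) (acc : List Char), 0 < n → n ≤ f →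
    Nat.toDigitsCore b f n acc = ((Nat.digits b n).map Nat.digitChar).reverse ++ acc := by
  intro n
  induction n using Nat.strong_induction_on with
  | _ n ih =>
    intro f acc hn hf
    match f with
    | 0 => omega
    | f+1 =>
      rw [Nat.toDigitsCore]
      by_cases hq : n / b = 0
      · rw [if_pos hq, Nat.digits_def' (by omega : 1 < b) hn, hq]
        simp
      · rw [if_neg hq]
        have hlt : n / b < n := Nat.div_lt_self hn (by omega)
        rw [ih (n / b) hlt f (Nat.digitChar (n % b) :: acc) (Nat.pos_of_ne_zero hq) (by omega)]
        rw [Nat.digits_def' (by omega : 1 < b) hn]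
        simp

lemma toDigits_eq_digits (b n : Nat) (hb : 2 ≤ b) (hn : 0 < n) :
    Nat.toDigits b n = ((Nat.digits b n).map Nat.digitChar).reverse := by
  rw [Nat.toDigits, toDigitsCore_eq b hb n (n+1) [] hn (by omega), List.append_nil]

lemma digits_len_eq_bitLength (m : Nat) : (Nat.digits 2 m).length = PySem.Int.bitLength (m : Int) := by
  induction m using Nat.strong_induction_on with
  | _ m ih =>
    by_cases hm : m = 0
    · subst hm; simp [PySem.Int.bitLength_zero]
    · rw [Nat.digits_def' (by norm_num : (1:Nat) < 2) (Nat.pos_of_ne_zero hm),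
          PySem.Int.bitLength_natCast (Nat.pos_of_ne_zero hm), List.length_cons,
          ih (m / 2) (Nat.div_lt_self (Nat.pos_of_ne_zero hm) one_lt_two)]

lemma toChars_G (m : Nat) (hm : 0 < m) :
    PySem.Int.toChars ((Nat.ofDigits 10 (Nat.digits 2 m) : Nat) : Int) = Nat.toDigits 2 m := by
  have hdig : Nat.digits 10 (Nat.ofDigits 10 (Nat.digits 2 m)) = Nat.digits 2 m := by
    refine Nat.digits_ofDigits 10 (by norm_num) _ (fun d hd => ?_) (fun h => Nat.getLast_digit_ne_zero 2 (by omega))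
    have := Nat.digits_lt_base (by norm_num : (1:Nat) < 2) hd
    omega
  have hG : Nat.ofDigits 10 (Nat.digits 2 m) ≠ 0 := by
    intro h0
    have : Nat.digits 2 m = [] := by rw [← hdig, h0]; simp
    rw [Nat.digits_eq_nil_iff_eq_zero] at this
    omega
  rw [PySem.Int.toChars, if_neg (by simp : ¬ ((Nat.ofDigits 10 (Nat.digits 2 m) : Nat) : Int) < 0)]
  rw [Int.toNat_natCast]
  rw [toDigits_eq_digits 10 _ (by norm_num) (Nat.pos_of_ne_zero hG), hdig,
      toDigits_eq_digits 2 m (by norm_num) hm]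

lemma mem_toDigits_two (v : Nat) (c : Char) (hc : c ∈ Nat.toDigits 2 v) : c = '0' ∨ c = '1' := by
  by_cases hv : v = 0
  · subst hv
    have : Nat.toDigits 2 0 = ['0'] := by decide
    rw [this] at hc
    simp at hc
    exact Or.inl hc
  · rw [toDigits_eq_digits 2 v (by norm_num) (Nat.pos_of_ne_zero hv)] at hc
    rw [List.mem_reverse, List.mem_map] at hc
    obtain ⟨d, hd, rfl⟩ := hc
    have := Nat.digits_lt_base (by norm_num : (1:Nat) < 2) hd
    interval_cases d
    · exact Or.inl rfl
    · exact Or.inr rfl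

lemma immPad_spec : ∀ (bits : Int) (cs : List Char),
    immPad bits cs = List.replicate (bits - cs.length).toNat '0' ++ cs := by
  intro bits cs
  generalize hk : (bits - cs.length).toNat = k
  induction k generalizing cs with
  | zero =>
    rw [immPad, dif_neg (by omega)]
    simp
  | succ k ihk =>
    rw [immPad, dif_pos (by omega)]
    rw [ihk ('0' :: cs) (by simp; omega)]
    rw [List.replicate_succ']
    simp

lemma zfill_eq (cs : List Char) (w : Int) (h : ∀ c ∈ cs, c = '0' ∨ c = '1') (hne : cs ≠ [])
    (hlen : (cs.length : Int) ≤ w) :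
    PySem.Chars.zfill cs w = List.replicate (w - cs.length).toNat '0' ++ cs := by
  match cs, hne with
  | c :: rest, _ =>
    have hc := h c (by simp)
    have hcpm : ¬ (c = '+' ∨ c = '-') := by rcases hc with rfl | rfl <;> simp
    by_cases hw : w ≤ ((c :: rest).length : Int)
    · rw [PySem.Chars.zfill.eq_def, if_pos hw,
        show (w - ((c :: rest).length : Int)).toNat = 0 by omega]
      simp
    · simp only [PySem.Chars.zfill.eq_def, if_neg hw, if_neg hcpm]
      have he : w.toNat - (c :: rest).length = (w - ((c :: rest).length : Int)).toNat := by
        simp only [List.length_cons] at *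
        omega
      rw [he]

-- n-bit LSB-first rendering of a natural number
def repL : Nat → Nat → List Char
  | 0, _ => []
  | n+1, v => Nat.digitChar (v % 2) :: repL n (v / 2)

def addOneRev : List Char → List Char
  | [] => []
  | c :: r => if c = '0' then '1' :: r else '0' :: addOneRev r

lemma repL_zero (n : Nat) : repL n 0 = List.replicate n '0' := by
  induction n with
  | zero => rfl
  | succ n ih =>
    have h0 : Nat.digitChar (0 % 2) = '0' := by decide
    rw [repL, h0, ih, List.replicate_succ]

lemma repL_eq (n v : Nat) (h : v < 2 ^ n) :
    repL n v = (Nat.digits 2 v).map Nat.digitChar ++ List.replicate (n - (Nat.digits 2 v).length) '0' := by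
  induction n generalizing v with
  | zero =>
    have : v = 0 := by simpa using h
    subst this; simp [repL]
  | succ n ih =>
    by_cases hv : v = 0
    · subst hv
      simp [repL_zero]
    · have hP : v / 2 < 2 ^ n := by
        have : 2 ^ (n + 1) = 2 ^ n * 2 := by ring
        omega
      rw [Nat.digits_def' (by norm_num : (1:Nat) < 2) (Nat.pos_of_ne_zero hv)]
      simp only [repL, List.map_cons, List.length_cons, List.cons_append]
      rw [ih (v / 2) hP]
      have he : n + 1 - ((Nat.digits 2 (v / 2)).length + 1) = n - (Nat.digits 2 (v / 2)).length := by
        omega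
      rw [he]

lemma repL_flip (n v : Nat) (h : v < 2 ^ n) :
    (repL n v).map (fun c => if c = '0' then '1' else '0') = repL n (2 ^ n - 1 - v) := by
  induction n generalizing v with
  | zero => rfl
  | succ n ih =>
    have hpow : 2 ^ (n + 1) = 2 ^ n * 2 := by ring
    have hP : v / 2 < 2 ^ n := by omega
    simp only [repL, List.map_cons]
    rw [ih (v / 2) hP]
    have h2 : (2 ^ (n + 1) - 1 - v) % 2 = 1 - v % 2 := by omega
    have h3 : (2 ^ (n + 1) - 1 - v) / 2 = 2 ^ n - 1 - v / 2 := by omega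
    rw [h2, h3]
    rcases Nat.mod_two_eq_zero_or_one v with hm | hm <;>
      simp only [hm] <;> exact List.cons_eq_cons.mpr ⟨by decide, rfl⟩

lemma addOneRev_repL (n v : Nat) (h : v < 2 ^ n) :
    addOneRev (repL n v) = repL n ((v + 1) % 2 ^ n) := by
  induction n generalizing v with
  | zero => rfl
  | succ n ih =>
    have hpow : 2 ^ (n + 1) = 2 ^ n * 2 := by ring
    have hP : v / 2 < 2 ^ n := by omega
    rcases Nat.mod_two_eq_zero_or_one v with hm | hm
    · -- even: lsb 0 -> 1, done
      have hlt : v + 1 < 2 ^ (n + 1) := by omega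
      rw [Nat.mod_eq_of_lt hlt]
      simp only [repL, hm, addOneRev]
      rw [if_pos (by decide)]
      have e1 : (v + 1) % 2 = 1 := by omega
      have e2 : (v + 1) / 2 = v / 2 := by omega
      rw [e1, e2]
      exact List.cons_eq_cons.mpr ⟨by decide, rfl⟩
    · -- odd: lsb 1 -> 0, carry
      simp only [repL, hm, addOneRev]
      rw [if_neg (by decide)]
      rw [ih (v / 2) hP]
      by_cases hend : v + 1 = 2 ^ (n + 1)
      · rw [hend]
        simp only [Nat.mod_self]
        have hv2 : v / 2 + 1 = 2 ^ n := by omega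
        rw [hv2, Nat.mod_self]
        exact List.cons_eq_cons.mpr ⟨by decide, rfl⟩
      · have hlt : v + 1 < 2 ^ (n + 1) := by omega
        rw [Nat.mod_eq_of_lt hlt]
        have h1 : (v + 1) % 2 = 0 := by omega
        have h2 : (v + 1) / 2 = v / 2 + 1 := by omega
        have h3 : (v / 2 + 1) % 2 ^ n = v / 2 + 1 := Nat.mod_eq_of_lt (by omega)
        rw [h1, h2, h3]
        exact List.cons_eq_cons.mpr ⟨by decide, rfl⟩

lemma pad_reverse (n v : Nat) (hn : 0 < n) (h : v < 2 ^ n) :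
    (List.replicate (n - (Nat.toDigits 2 v).length) '0' ++ Nat.toDigits 2 v).reverse = repL n v := by
  by_cases hv : v = 0
  · subst hv
    have h0 : Nat.toDigits 2 0 = ['0'] := by decide
    rw [h0, repL_zero]
    simp only [List.reverse_append, List.reverse_replicate, List.reverse_cons, List.reverse_nil,
      List.nil_append, List.length_cons, List.length_nil, List.singleton_append]
    rw [← List.replicate_succ]
    congr 1
    omega
  · rw [toDigits_eq_digits 2 v (by norm_num) (Nat.pos_of_ne_zero hv)]
    rw [repL_eq n v h]
    simp

lemma pyGetD_append_mid (ys suf : List Char) (c d : Char) :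
    PySem.List.pyGetD (ys ++ c :: suf) (ys.length : Int) d = c := by
  rw [PySem.List.pyGetD_natCast, List.getD_eq_getElem?_getD,
      List.getElem?_append_right (le_refl ys.length)]
  rw [Nat.sub_self]
  rfl

lemma pySetD_append_mid (ys suf : List Char) (c v : Char) :
    PySem.List.pySetD (ys ++ c :: suf) (ys.length : Int) v = ys ++ v :: suf := by
  rw [PySem.List.pySetD, PySem.List.pySet?, PySem.List.pyIdx?]
  rw [if_pos (by positivity), if_pos (by simp)]
  simp only [Int.toNat_natCast, Option.map_some, Option.getD_some]
  rw [List.set_append_right _ _ (le_refl _)]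
  simp

lemma immAdd_stop (res : List Char) (i : Int) : immAdd res 0 i = res := by
  rw [immAdd, dif_neg (by simp)]

lemma immAdd_spec : ∀ (xs suf : List Char),
    immAdd (xs ++ suf) 1 ((xs.length : Int) - 1) = (addOneRev xs.reverse).reverse ++ suf := by
  intro xs
  induction xs using List.reverseRecOn with
  | nil =>
    intro suf
    rw [immAdd, dif_neg (by norm_num)]
    simp [addOneRev]
  | append_singleton ys c ih =>
    intro suf
    have hlen : (((ys ++ [c]).length : Int)) - 1 = (ys.length : Int) := by simp
    rw [hlen, List.append_assoc, List.singleton_append]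
    rw [immAdd, dif_pos ⟨by positivity, rfl⟩]
    rw [pyGetD_append_mid, pySetD_append_mid, pySetD_append_mid]
    by_cases hc : c = '0'
    · rw [if_pos hc, immAdd_stop]
      subst hc
      simp [addOneRev]
    · rw [if_neg hc]
      rw [ih ('0' :: suf)]
      simp [addOneRev, hc]

lemma shiftLeft_sub_one (n : Nat) : (1 <<< n : Int) - 1 = ((2 ^ n - 1 : Nat) : Int) := by
  rw [Nat.one_shiftLeft]
  push_cast [Nat.one_le_two_pow]
  ring

lemma band_mask_of_nonneg (m n : Nat) (h : m < 2 ^ n) :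
    PySem.Int.band (m : Int) ((1 <<< n : Int) - 1) = (m : Int) := by
  rw [shiftLeft_sub_one, PySem.Int.band_natCast, Nat.and_two_pow_sub_one_eq_mod,
      Nat.mod_eq_of_lt h]

lemma band_mask_neg (m n : Nat) (h0 : 0 < m) (h : m ≤ 2 ^ n) :
    PySem.Int.band (-(m : Int)) ((1 <<< n : Int) - 1) = ((2 ^ n - m : Nat) : Int) := by
  rw [shiftLeft_sub_one, PySem.Int.band]
  rw [if_neg (by omega), if_pos (by positivity)]
  have h1 : (-(-(m : Int)) - 1).toNat = m - 1 := by omega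
  have h2 : ((2 ^ n - 1 : Nat) : Int).toNat = 2 ^ n - 1 := by omega
  rw [h1, h2]
  rw [Nat.and_comm, Nat.and_two_pow_sub_one_eq_mod, Nat.mod_eq_of_lt (by omega)]
  congr 1
  omega

lemma dropWhile_eq_self_of_forall {p : Char → Bool} {l : List Char} (h : ∀ c ∈ l, ¬ p c) :
    List.dropWhile p l = l := by
  cases l with
  | nil => rfl
  | cons a t => simp [List.dropWhile, h a (by simp)]

lemma auxNonneg (o : Option Nat) :
    0 ≤ (Option.map (fun n : Int => n) (o.bind fun a => pure ((a : Nat) : Int))).getD 0 := by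
  cases o <;> simp

lemma ofChars_nonneg (cs : List Char) (h : PySem.Chars.strIsdigit cs = true) :
    0 ≤ (PySem.Int.ofChars? cs).getD 0 := by
  simp only [PySem.Chars.strIsdigit, Bool.and_eq_true, Bool.not_eq_true', List.isEmpty_eq_false_iff,
    List.all_eq_true] at h
  obtain ⟨hne, hall⟩ := h
  have hsp : ∀ c ∈ cs, ¬ PySem.Int.isIntSpace c = true := by
    intro c hc
    have hd := hall c hc
    simp only [PySem.Chars.isdigit, Bool.and_eq_true, decide_eq_true_eq] at hd
    simp only [PySem.Int.isIntSpace, Bool.or_eq_true, decide_eq_true_eq]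
    push Not
    refine ⟨⟨⟨⟨⟨?_,?_⟩,?_⟩,?_⟩,?_⟩,?_⟩ <;> rintro rfl <;> revert hd <;> decide
  rw [PySem.Int.ofChars?]
  rw [dropWhile_eq_self_of_forall hsp]
  rw [dropWhile_eq_self_of_forall (by intro c hc; exact hsp c (by simpa using hc))]
  rw [List.reverse_reverse]
  split
  · exfalso
    have hc := hall '-' (by simp)
    revert hc; decide
  · exfalso
    have hc := hall '+' (by simp)
    revert hc; decide
  · exact auxNonneg _

-- ===== VERDICT (by name: the statement is the Claim_ definition above) =====
lemma toDigits_two_ne_nil (m : Nat) : Nat.toDigits 2 m ≠ [] := by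
  by_cases hm : m = 0
  · subst hm; decide
  · rw [toDigits_eq_digits 2 m (by norm_num) (Nat.pos_of_ne_zero hm)]
    simp [Nat.digits_eq_nil_iff_eq_zero, hm]

lemma toDigits_two_length_le (v n : Nat) (hn : 0 < n) (hv : v < 2 ^ n) :
    (Nat.toDigits 2 v).length ≤ n := by
  by_cases hz : v = 0
  · subst hz
    simpa using hn
  · rw [toDigits_eq_digits 2 v (by norm_num) (Nat.pos_of_ne_zero hz)]
    simp only [List.length_reverse, List.length_map]
    exact (Nat.digits_length_le_iff (by norm_num) v).mpr hv

set_option maxHeartbeats 1000000 in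
theorem immediate_spec : Claim_equal_immediate := by
  intro x bits hdom hpre
  unfold Spec_immediate
  by_cases hb : bits ≤ 0
  · simp only [immediate, immediate_alt, if_pos hb]
  simp only [immediate, immediate_alt, if_neg hb]
  have hbpos : 0 < bits := by omega
  generalize PySem.Chars.strip x.toList = s
  generalize decide (PySem.List.pyGetD s 0 ' ' = '-') = ng
  generalize (if ng = true then PySem.List.slice s (some 1) none else s) = cs
  by_cases hguard : cs = [] ∨ ¬ PySem.Chars.strIsdigit cs = true
  · rw [if_pos hguard, if_pos hguard]
  rw [if_neg hguard, if_neg hguard]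
  have hdig : PySem.Chars.strIsdigit cs = true := by
    rcases not_or.mp hguard with ⟨_, h2⟩
    simpa using h2
  have hy0 : 0 ≤ (PySem.Int.ofChars? cs).getD 0 := ofChars_nonneg cs hdig
  generalize hyv : (PySem.Int.ofChars? cs).getD 0 = y at hy0 ⊢
  obtain ⟨m, rfl⟩ := Int.eq_ofNat_of_zero_le hy0
  obtain ⟨n, rfl⟩ := Int.eq_ofNat_of_zero_le (le_of_lt hbpos)
  have hnpos : 0 < n := by exact_mod_cast hbpos
  rw [Int.toNat_natCast, Int.toNat_natCast]
  -- A's binary string is the base-2 rendering of m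
  have hbc : PySem.Int.toChars
      (if (m : Int) = 0 then 0 else immBinLoop (m + 1) (m : Int) 1 0) =
      Nat.toDigits 2 m := by
    by_cases hz : m = 0
    · subst hz
      decide
    · rw [if_neg (by exact_mod_cast hz),
          immBinLoop_spec m (m + 1) (by omega) 1 0, zero_add, one_mul]
      exact toChars_G m (Nat.pos_of_ne_zero hz)
  rw [hbc]
  -- the two overflow tests agree
  have hlens : (if (m : Int) ≠ 0 then ((PySem.Int.bitLength (m : Int) : Nat) : Int) else 1) =
      ((Nat.toDigits 2 m).length : Int) := by
    by_cases hz : m = 0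
    · subst hz
      rw [if_neg (by simp)]
      decide
    · rw [if_pos (by exact_mod_cast hz),
          toDigits_eq_digits 2 m (by norm_num) (Nat.pos_of_ne_zero hz),
          List.length_reverse, List.length_map, digits_len_eq_bitLength m]
  rw [hlens]
  by_cases herr : ((Nat.toDigits 2 m).length : Int) > (n : Int)
  · rw [if_pos herr, if_pos herr]
  rw [if_neg herr, if_neg herr]
  have hLn : (Nat.toDigits 2 m).length ≤ n := by exact_mod_cast not_lt.mp herr
  have hmlt : m < 2 ^ n := by
    by_cases hz : m = 0
    · have hp : (0 : Nat) < 2 ^ n := by positivity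
      omega
    · have h1 : PySem.Int.bitLength (m : Int) ≤ n := by
        rw [if_pos (by exact_mod_cast hz)] at hlens
        omega
      calc m = (m : Int).natAbs := (Int.natAbs_natCast m).symm
        _ < 2 ^ PySem.Int.bitLength (m : Int) := PySem.Int.lt_two_pow_bitLength _
        _ ≤ 2 ^ n := Nat.pow_le_pow_right (by norm_num) h1
  have hpad : immPad (n : Int) (Nat.toDigits 2 m) =
      List.replicate (n - (Nat.toDigits 2 m).length) '0' ++ Nat.toDigits 2 m := by
    rw [immPad_spec]
    congr 2
    omega
  rw [hpad]
  have hPlen : (List.replicate (n - (Nat.toDigits 2 m).length) '0' ++ Nat.toDigits 2 m).length = n := by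
    simp only [List.length_append, List.length_replicate]
    omega
  cases ng with
  | false =>
    rw [if_pos (by decide), if_neg (by decide)]
    rw [band_mask_of_nonneg m n hmlt]
    rw [show PySem.Int.toBinChars (m : Int) = Nat.toDigits 2 m from by
          rw [PySem.Int.toBinChars, if_neg (by simp), Int.toNat_natCast]]
    rw [zfill_eq (Nat.toDigits 2 m) (n : Int) (mem_toDigits_two m) (toDigits_two_ne_nil m)
          (by exact_mod_cast hLn)]
    rw [show ((n : Int) - ((Nat.toDigits 2 m).length : Int)).toNat
          = n - (Nat.toDigits 2 m).length from by omega]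
  | true =>
    rw [if_neg (by decide), if_pos (by decide)]
    -- the final character-copy loop is the identity, the flip loop a map over the padded string
    rw [PySem.List.foldl_append_singleton, List.nil_append]
    rw [PySem.List.foldl_append_singleton_eq_map, List.nil_append]
    have hmapf : (PySem.List.pyRange 0 ((n : Nat) : Int) 1).map
        (fun i => if PySem.List.pyGetD (List.replicate (n - (Nat.toDigits 2 m).length) '0' ++ Nat.toDigits 2 m) i ' ' = '0' then '1' else '0')
        = (List.replicate (n - (Nat.toDigits 2 m).length) '0' ++ Nat.toDigits 2 m).map
            (fun c => if c = '0' then '1' else '0') := by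
      conv_lhs => rw [show ((n : Nat) : Int)
        = (((List.replicate (n - (Nat.toDigits 2 m).length) '0' ++ Nat.toDigits 2 m).length : Nat) : Int) from by
          rw [hPlen]]
      rw [show (fun i => if PySem.List.pyGetD (List.replicate (n - (Nat.toDigits 2 m).length) '0' ++ Nat.toDigits 2 m) i ' ' = '0' then '1' else '0')
            = ((fun c => if c = '0' then '1' else '0') ∘
               (fun j => PySem.List.pyGetD (List.replicate (n - (Nat.toDigits 2 m).length) '0' ++ Nat.toDigits 2 m) j ' ')) from rfl]
      rw [← List.map_map, PySem.List.map_pyGetD_pyRange_zero']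
    rw [hmapf]
    -- the add-1 loop is addOneRev on the reversed string
    have hadd := immAdd_spec ((List.replicate (n - (Nat.toDigits 2 m).length) '0' ++ Nat.toDigits 2 m).map
        (fun c => if c = '0' then '1' else '0')) []
    rw [List.append_nil, List.append_nil] at hadd
    rw [show ((((List.replicate (n - (Nat.toDigits 2 m).length) '0' ++ Nat.toDigits 2 m).map
          (fun c => if c = '0' then '1' else '0')).length : Nat) : Int) = ((n : Nat) : Int) from by
        rw [List.length_map, hPlen]] at hadd
    rw [hadd]
    -- evaluate the bit-level pipeline
    rw [← List.map_reverse, pad_reverse n m hnpos hmlt, repL_flip n m hmlt,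
        addOneRev_repL n (2 ^ n - 1 - m) (by omega),
        show 2 ^ n - 1 - m + 1 = 2 ^ n - m from by omega]
    -- B's masked value
    have hband : PySem.Int.band (-(m : Int)) (((1 <<< n : Nat) : Int) - 1)
        = (((2 ^ n - m) % 2 ^ n : Nat) : Int) := by
      by_cases hz : m = 0
      · subst hz
        rw [Nat.sub_zero, Nat.mod_self]
        rw [show (-(((0 : Nat)) : Int)) = (((0 : Nat)) : Int) from by norm_num]
        exact band_mask_of_nonneg 0 n (by positivity)
      · rw [band_mask_neg m n (Nat.pos_of_ne_zero hz) (le_of_lt hmlt),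
            Nat.mod_eq_of_lt (by omega)]
    rw [hband]
    have hr : (2 ^ n - m) % 2 ^ n < 2 ^ n := Nat.mod_lt _ (by positivity)
    rw [show PySem.Int.toBinChars ((((2 ^ n - m) % 2 ^ n : Nat) : Int)) = Nat.toDigits 2 ((2 ^ n - m) % 2 ^ n) from by
          rw [PySem.Int.toBinChars, if_neg (not_lt.mpr (Int.natCast_nonneg _)), Int.toNat_natCast]]
    rw [zfill_eq _ _ (mem_toDigits_two _) (toDigits_two_ne_nil _)
          (by exact_mod_cast toDigits_two_length_le _ n hnpos hr)]
    rw [show ((n : Int) - ((Nat.toDigits 2 ((2 ^ n - m) % 2 ^ n)).length : Int)).toNat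
          = n - (Nat.toDigits 2 ((2 ^ n - m) % 2 ^ n)).length from by
        have := toDigits_two_length_le _ n hnpos hr
        omega]
    rw [← pad_reverse n ((2 ^ n - m) % 2 ^ n) hnpos hr, List.reverse_reverse]
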